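-- pv_equiv track=rewrite | github.com/MedicAdrenaline/oou-postutme-exam | app.py | calculate_amount
-- ===== SOURCE A (Python) =====
-- def calculate_amount(selected_modes):
--     amount = 0
--     for mode in selected_modes:
--         if mode == 'alevel':
--             amount += 3000
--         else:
--             amount += 2000
--     return amount
-- ===== SOURCE B (Python) =====
-- def calculate_amount(selected_modes):
--     modes = list(selected_modes)
--     return 2000 * len(modes) + 1000 * modes.count('alevel')
-- ===== Notes on version B (the rewrite author's own statement) =====
-- stated objective: simpler
-- what changed: Replaces the per-element accumulating loop with a closed form: 2000 per mode plus an extra 1000 per 'alevel', via len() and count().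
import Mathlib
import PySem

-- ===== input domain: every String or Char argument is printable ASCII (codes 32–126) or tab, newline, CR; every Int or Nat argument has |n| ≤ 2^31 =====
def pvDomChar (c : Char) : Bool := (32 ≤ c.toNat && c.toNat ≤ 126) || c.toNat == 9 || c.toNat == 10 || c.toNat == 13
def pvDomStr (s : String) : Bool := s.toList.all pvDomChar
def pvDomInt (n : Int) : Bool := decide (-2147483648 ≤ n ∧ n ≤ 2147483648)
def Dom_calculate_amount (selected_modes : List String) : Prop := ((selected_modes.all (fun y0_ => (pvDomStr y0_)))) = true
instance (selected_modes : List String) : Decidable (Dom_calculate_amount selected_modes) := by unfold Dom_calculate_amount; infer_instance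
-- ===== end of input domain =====

-- ===== PORT A =====
def calculate_amount (selected_modes : List String) : Int :=
  selected_modes.foldl (fun amount mode => if mode == "alevel" then amount + 3000 else amount + 2000) 0

-- ===== PORT B =====
-- B: closed form — 2000 per mode plus an extra 1000 per 'alevel' (len/count), no per-element accumulation.
def calculate_amount_alt (selected_modes : List String) : Int :=
  2000 * (selected_modes.length : Int) + 1000 * (PySem.List.count selected_modes "alevel")

-- ===== PRECONDITION & SPEC =====
def Spec_calculate_amount (selected_modes : List String) (out : Int) : Prop := out = calculate_amount_alt selected_modes
instance (selected_modes : List String) (out : Int) : Decidable (Spec_calculate_amount selected_modes out) := by unfold Spec_calculate_amount; infer_instance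

-- ===== CLAIM (what is proved, stated in full; the proofs are below) =====
def Claim_equal_calculate_amount : Prop := ∀ (selected_modes : List String), Dom_calculate_amount selected_modes → Spec_calculate_amount selected_modes (calculate_amount selected_modes)

-- ===== LEMMAS AND PROOFS =====

-- ===== VERDICT (by name: the statement is the Claim_ definition above) =====
theorem foldl_amount (l : List String) (a : Int) :
    l.foldl (fun amount mode => if mode == "alevel" then amount + 3000 else amount + 2000) a
      = a + 2000 * (l.length : Int) + 1000 * (PySem.List.count l "alevel") := by
  induction l generalizing a with
  | nil => simp [PySem.List.count]
  | cons h t ih =>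
    simp only [List.foldl_cons, ih, PySem.List.count, List.count_cons, List.length_cons]
    by_cases hh : h = "alevel" <;> simp [hh] <;> ring

theorem calculate_amount_spec : Claim_equal_calculate_amount := by
  intro l _
  show calculate_amount l = calculate_amount_alt l
  unfold calculate_amount calculate_amount_alt
  rw [foldl_amount]
  ring
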